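-- pv_equiv track=rewrite | github.com/SoultySprings/PyProjects | DSAinPython/OtherExamples/meanAvgNums.py | averageEvenOddOverall
-- ===== SOURCE A (Python) =====
-- def averageEvenOddOverall(array):
--     sumEven, sumOdd, sumOverall = 0,0,0
--     countofEvenNums, countofOddNums, countofOverallNums = 0,0,0
--     for number in array:
--         if number % 2 == 0 :
--             countofEvenNums += 1
--             sumEven += number
--         elif number % 2 == 1:
--             countofOddNums += 1
--             sumOdd += number
--         sumOverall += number
--     return sumEven//countofEvenNums, sumOdd//countofOddNums, sumOverall//len(array)
-- ===== SOURCE B (Python) =====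
-- def averageEvenOddOverall(array):
--     evens = [n for n in array if n % 2 == 0]
--     odds = [n for n in array if n % 2 == 1]
--     return sum(evens) // len(evens), sum(odds) // len(odds), sum(array) // len(array)
-- ===== Notes on version B (the rewrite author's own statement) =====
-- stated objective: simpler
-- what changed: Replaces the fused six-accumulator loop by three independent filtered scans: evens and odds are built as comprehensions and each average is sum//len of the corresponding subsequence.
import Mathlib
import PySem

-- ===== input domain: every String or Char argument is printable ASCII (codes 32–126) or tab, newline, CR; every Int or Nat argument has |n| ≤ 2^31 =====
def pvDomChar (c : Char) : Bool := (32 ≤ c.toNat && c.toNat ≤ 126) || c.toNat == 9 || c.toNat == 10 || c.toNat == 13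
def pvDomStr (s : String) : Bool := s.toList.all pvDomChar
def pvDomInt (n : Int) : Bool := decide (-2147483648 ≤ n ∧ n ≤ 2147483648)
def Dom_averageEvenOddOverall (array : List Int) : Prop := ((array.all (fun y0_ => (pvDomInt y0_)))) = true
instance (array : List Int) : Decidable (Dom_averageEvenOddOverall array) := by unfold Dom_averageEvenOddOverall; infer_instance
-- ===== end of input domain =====

-- B replaces A's fused six-accumulator loop by three independent filtered scans (simpler decomposition, same cost).


-- ===== PORT A =====
-- fold state: (sumEven, sumOdd, sumOverall, countofEvenNums, countofOddNums); A's countofOverallNums is never touched and is omitted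
def averageEvenOddOverall (array : List Int) : Int × Int × Int :=
  let s := array.foldl (fun (st : Int × Int × Int × Int × Int) number =>
    let (sumEven, sumOdd, sumOverall, cE, cO) := st
    if PySem.Int.mod number 2 = 0 then
      (sumEven + number, sumOdd, sumOverall + number, cE + 1, cO)
    else if PySem.Int.mod number 2 = 1 then
      (sumEven, sumOdd + number, sumOverall + number, cE, cO + 1)
    else
      (sumEven, sumOdd, sumOverall + number, cE, cO)) (0, 0, 0, 0, 0)
  (PySem.Int.floordiv s.1 s.2.2.2.1, PySem.Int.floordiv s.2.1 s.2.2.2.2,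
   PySem.Int.floordiv s.2.2.1 (array.length : Int))

-- ===== PORT B =====
def averageEvenOddOverall_alt (array : List Int) : Int × Int × Int :=
  let evens := array.filter (fun n => PySem.Int.mod n 2 = 0)
  let odds := array.filter (fun n => PySem.Int.mod n 2 = 1)
  (PySem.Int.floordiv evens.sum (evens.length : Int),
   PySem.Int.floordiv odds.sum (odds.length : Int),
   PySem.Int.floordiv array.sum (array.length : Int))

-- ===== PRECONDITION & SPEC =====
-- Pre_ excludes exactly the inputs where A raises ZeroDivisionError: arrays with no even or no odd element.
def Pre_averageEvenOddOverall (array : List Int) : Prop :=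
  (∃ n ∈ array, PySem.Int.mod n 2 = 0) ∧ (∃ n ∈ array, PySem.Int.mod n 2 = 1)
instance (array : List Int) : Decidable (Pre_averageEvenOddOverall array) := by
  unfold Pre_averageEvenOddOverall; infer_instance
def pvWitness_averageEvenOddOverall : List Int := [1, 2, 3, 4]
def Spec_averageEvenOddOverall (array : List Int) (out : Int × Int × Int) : Prop := out = averageEvenOddOverall_alt array
instance (array : List Int) (out : Int × Int × Int) : Decidable (Spec_averageEvenOddOverall array out) := by unfold Spec_averageEvenOddOverall; infer_instance

-- ===== CLAIM (what is proved, stated in full; the proofs are below) =====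
def Claim_equal_averageEvenOddOverall : Prop := ∀ (array : List Int), Dom_averageEvenOddOverall array → Pre_averageEvenOddOverall array → Spec_averageEvenOddOverall array (averageEvenOddOverall array)

-- ===== LEMMAS AND PROOFS =====

-- A's fold, started from arbitrary accumulators, adds the filtered sums and counts.
theorem avg_fold_eq (array : List Int) (se so sa ce co : Int) :
    array.foldl (fun (st : Int × Int × Int × Int × Int) number =>
      let (sumEven, sumOdd, sumOverall, cE, cO) := st
      if PySem.Int.mod number 2 = 0 then
        (sumEven + number, sumOdd, sumOverall + number, cE + 1, cO)
      else if PySem.Int.mod number 2 = 1 then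
        (sumEven, sumOdd + number, sumOverall + number, cE, cO + 1)
      else
        (sumEven, sumOdd, sumOverall + number, cE, cO)) (se, so, sa, ce, co)
    = (se + (array.filter (fun n => PySem.Int.mod n 2 = 0)).sum,
       so + (array.filter (fun n => PySem.Int.mod n 2 = 1)).sum,
       sa + array.sum,
       ce + ((array.filter (fun n => PySem.Int.mod n 2 = 0)).length : Int),
       co + ((array.filter (fun n => PySem.Int.mod n 2 = 1)).length : Int)) := by
  induction array generalizing se so sa ce co with
  | nil => simp
  | cons x xs ih =>
    have hx : PySem.Int.mod x 2 = 0 ∨ PySem.Int.mod x 2 = 1 := by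
      have h1 := PySem.Int.mod_nonneg x (b := 2) (by norm_num)
      have h2 := PySem.Int.mod_lt x (b := 2) (by norm_num)
      omega
    rcases hx with h | h
    · have h1 : ¬ (PySem.Int.mod x 2 = 1) := by omega
      simp only [List.foldl_cons, List.filter_cons, h, decide_true, if_true,
        decide_eq_true_eq]
      rw [ih]
      simp only [Prod.mk.injEq, List.sum_cons, List.length_cons]
      and_intros <;> push_cast <;> ring
    · have h0 : ¬ (PySem.Int.mod x 2 = 0) := by omega
      simp only [List.foldl_cons, List.filter_cons, h, decide_true, if_true,
        decide_eq_true_eq]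
      rw [ih]
      simp only [Prod.mk.injEq, List.sum_cons, List.length_cons]
      and_intros <;> push_cast <;> ring

-- ===== VERDICT (by name: the statement is the Claim_ definition above) =====
theorem averageEvenOddOverall_spec : Claim_equal_averageEvenOddOverall := by
  intro array _ _
  unfold Spec_averageEvenOddOverall averageEvenOddOverall averageEvenOddOverall_alt
  simp only [avg_fold_eq]
  norm_num
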